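-- pv_equiv track=rewrite | github.com/ofekavidan/Intro-to-CS-HUJI-Python- | Exercise08/nonogram.py | is_valid_list
-- ===== SOURCE A (Python) =====
-- def is_valid_list(n, blocks, innerlst):
--     """
--     This function gets a list of painted/unpainted squares, and a block
--     it returns true if the list is valid, false otherwise
--     :param n: number of squares (or in this case, lst length)
--     :param blocks: number of the squares we want to paint. for instance => [2,1]
--     :param innerlst: the list we want to compare (to the blocks) and check if valid
--     :return: true if the list is valid, false otherwise
--     """
--     counterlst = []
--     counter = 0
--
--     if innerlst == blocks:
--         return True
--
--     if sum(innerlst) == 0 and sum(blocks) == 0 and all([v == 0 for v in innerlst]) and all([v == 0 for v in blocks]):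
--         return True
--
--     for element in innerlst:
--         if element == 0:
--             if counter != 0:
--                 counterlst.append(counter)
--                 counter = 0
--         else:
--             counter += 1
--
--     if counter != 0:
--         counterlst.append(counter)
--
--     if counterlst == blocks:
--         return True
--     else:
--         return False
-- ===== SOURCE B (Python) =====
-- def is_valid_list(n, blocks, innerlst):
--     """Run-length check via a split-on-separator pass over a 0/1 string
--     instead of A's running-counter state machine."""
--     if innerlst == blocks:
--         return True
--     if all(v == 0 for v in innerlst) and all(v == 0 for v in blocks):
--         return True
--     s = ''.join('1' if v else '0' for v in innerlst)
--     runs = [len(part) for part in s.split('0') if part]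
--     return runs == blocks
-- ===== Notes on version B (the rewrite author's own statement) =====
-- stated objective: idiomatic
-- what changed: Replaces A's running-counter state machine (mutable counter + flush-on-zero appends) with an idiomatic split-on-separator pass: the row is rendered as a 0/1 string and the block run-lengths are the lengths of the nonempty pieces of s.split('0'); A's redundant sum==0 tests in the all-zeros guard are dropped.
import Mathlib
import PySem

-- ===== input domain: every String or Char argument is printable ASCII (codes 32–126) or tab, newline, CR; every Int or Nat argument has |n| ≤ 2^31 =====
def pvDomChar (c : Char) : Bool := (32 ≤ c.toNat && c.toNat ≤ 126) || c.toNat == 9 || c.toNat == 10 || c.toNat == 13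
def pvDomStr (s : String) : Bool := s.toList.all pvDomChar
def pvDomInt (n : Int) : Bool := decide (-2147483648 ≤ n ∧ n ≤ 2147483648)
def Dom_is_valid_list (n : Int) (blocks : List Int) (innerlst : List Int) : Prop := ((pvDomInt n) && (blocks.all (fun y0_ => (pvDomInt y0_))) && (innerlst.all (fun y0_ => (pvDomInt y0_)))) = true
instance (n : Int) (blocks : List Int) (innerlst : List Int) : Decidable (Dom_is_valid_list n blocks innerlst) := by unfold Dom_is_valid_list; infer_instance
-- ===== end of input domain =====

-- B replaces A's running-counter state machine by a split-on-'0' pass over a 0/1 string (idiomatic; same cost).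

-- ===== PORT A =====
-- the body of A's for-loop, over the state (counterlst, counter)
def pvStepA (st : List Int × Int) (element : Int) : List Int × Int :=
  if element == 0 then
    (if st.2 != 0 then (st.1 ++ [st.2], 0) else st)
  else (st.1, st.2 + 1)

def is_valid_list (n : Int) (blocks : List Int) (innerlst : List Int) : Bool :=
  if innerlst == blocks then true
  else if innerlst.sum == 0 && blocks.sum == 0 && innerlst.all (fun v => v == 0)
          && blocks.all (fun v => v == 0) then true
  else
    -- the for-loop, then the final flush of the counter
    if (if (innerlst.foldl pvStepA ([], 0)).2 != 0
        then (innerlst.foldl pvStepA ([], 0)).1 ++ [(innerlst.foldl pvStepA ([], 0)).2]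
        else (innerlst.foldl pvStepA ([], 0)).1) == blocks then true else false

-- ===== PORT B =====
-- [len(part) for part in s.split('0') if part]; s.split('0') with a one-character
-- separator is List.splitOn '0' (empty pieces kept, as in Python)
def pvRunsB (s : List Char) : List Int :=
  ((s.splitOn '0').filter (fun p => !p.isEmpty)).map (fun p => (p.length : Int))

def is_valid_list_alt (n : Int) (blocks : List Int) (innerlst : List Int) : Bool :=
  if innerlst == blocks then true
  else if innerlst.all (fun v => v == 0) && blocks.all (fun v => v == 0) then true
  else
    -- s = ''.join('1' if v else '0' ...): the string kept as its list of characters (exact: join of one-char strings)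
    pvRunsB (innerlst.map (fun v => if v != 0 then '1' else '0')) == blocks

-- ===== PRECONDITION & SPEC =====
def Spec_is_valid_list (n : Int) (blocks : List Int) (innerlst : List Int) (out : Bool) : Prop := out = is_valid_list_alt n blocks innerlst
instance (n : Int) (blocks : List Int) (innerlst : List Int) (out : Bool) : Decidable (Spec_is_valid_list n blocks innerlst out) := by unfold Spec_is_valid_list; infer_instance

-- ===== CLAIM (what is proved, stated in full; the proofs are below) =====
def Claim_equal_is_valid_list : Prop := ∀ (n : Int) (blocks : List Int) (innerlst : List Int), Dom_is_valid_list n blocks innerlst → Spec_is_valid_list n blocks innerlst (is_valid_list n blocks innerlst)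

-- ===== LEMMAS AND PROOFS =====

-- an all-zero Int list sums to zero, so A's sum tests are implied by its all-zero tests
theorem sum_eq_zero_of_all_zero (l : List Int) (h : l.all (fun v => v == 0) = true) : l.sum = 0 := by
  induction l with
  | nil => rfl
  | cons x xs ih =>
    simp only [List.all_cons, Bool.and_eq_true, beq_iff_eq] at h
    simp [h.1, ih h.2]

theorem guard2_eq (i b : List Int) :
    (i.sum == 0 && b.sum == 0 && i.all (fun v => v == 0) && b.all (fun v => v == 0))
      = (i.all (fun v => v == 0) && b.all (fun v => v == 0)) := by
  by_cases hi : i.all (fun v => v == 0) = true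
  · by_cases hb : b.all (fun v => v == 0) = true
    · simp [hi, hb, sum_eq_zero_of_all_zero i hi, sum_eq_zero_of_all_zero b hb]
    · simp [Bool.eq_false_iff.mpr hb]
  · simp [Bool.eq_false_iff.mpr hi]

-- the run-length recursion both programs compute (counter carried as a Nat)
def rsGo : List Int → Nat → List Int
  | [], c => if c = 0 then [] else [(c : Int)]
  | x :: xs, c =>
    if x = 0 then (if c = 0 then rsGo xs 0 else (c : Int) :: rsGo xs 0)
    else rsGo xs (c + 1)

-- A's loop + final flush computes rsGo
theorem foldA_eq_rsGo (xs : List Int) : ∀ (acc : List Int) (c : Nat),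
    (if (xs.foldl pvStepA (acc, (c : Int))).2 != 0
     then (xs.foldl pvStepA (acc, (c : Int))).1 ++ [(xs.foldl pvStepA (acc, (c : Int))).2]
     else (xs.foldl pvStepA (acc, (c : Int))).1) = acc ++ rsGo xs c := by
  induction xs with
  | nil =>
    intro acc c
    by_cases hc : c = 0 <;> simp [rsGo, hc]
  | cons x xs ih =>
    intro acc c
    rw [List.foldl_cons]
    by_cases hx : x = 0
    · by_cases hc : c = 0
      · have hstep : pvStepA (acc, (c : Int)) x = (acc, ((0 : Nat) : Int)) := by
          simp [pvStepA, hx, hc]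
        rw [hstep, ih acc 0]
        all_goals simp [rsGo, hx, hc]
      · have hstep : pvStepA (acc, (c : Int)) x = (acc ++ [(c : Int)], ((0 : Nat) : Int)) := by
          simp [pvStepA, hx, hc]
        rw [hstep, ih (acc ++ [(c : Int)]) 0]
        all_goals simp [rsGo, hx, hc]
    · have hstep : pvStepA (acc, (c : Int)) x = (acc, ((c + 1 : Nat) : Int)) := by
        simp [pvStepA, hx]
      rw [hstep, ih acc (c + 1)]
      all_goals simp [rsGo, hx]

-- head-merging view of B's filtered split pieces
def mergeHead (c : Nat) : List (List Char) → List Int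
  | [] => if c = 0 then [] else [(c : Int)]
  | h :: t => (if c + h.length = 0 then [] else [((c + h.length : Nat) : Int)])
      ++ (t.filter (fun p => !p.isEmpty)).map (fun p => (p.length : Int))

theorem mergeHead_zero (parts : List (List Char)) :
    mergeHead 0 parts = (parts.filter (fun p => !p.isEmpty)).map (fun p => (p.length : Int)) := by
  cases parts with
  | nil => rfl
  | cons h t =>
    cases h with
    | nil => simp [mergeHead]
    | cons a h' => simp [mergeHead]

theorem splitOn_def (l : List Char) :
    List.splitOn '0' l = List.splitOnP (fun x => x == '0') l := rfl

-- rsGo is mergeHead of the splitOn pieces of the 0/1 character string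
theorem rsGo_eq_mergeHead (xs : List Int) : ∀ (c : Nat),
    rsGo xs c
      = mergeHead c (List.splitOnP (fun x => x == '0')
          (xs.map (fun v => if v != 0 then '1' else '0'))) := by
  induction xs with
  | nil => intro c; simp [rsGo, List.splitOnP_nil, mergeHead]
  | cons x xs ih =>
    intro c
    rw [List.map_cons, List.splitOnP_cons]
    by_cases hx : x = 0
    · have hch : ((if x != 0 then '1' else '0') == '0') = true := by simp [hx]
      rw [if_pos hch]
      have hm : mergeHead c ([] :: List.splitOnP (fun x => x == '0')
          (xs.map (fun v => if v != 0 then '1' else '0')))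
          = (if c = 0 then [] else [(c : Int)]) ++ rsGo xs 0 := by
        rw [ih 0, mergeHead_zero]
        simp [mergeHead]
      rw [hm]
      by_cases hc : c = 0 <;> simp [rsGo, hx, hc]
    · have hch : ((if x != 0 then '1' else '0') == '0') = false := by simp [hx]
      rw [if_neg (by simp [hx])]
      rcases hparts : List.splitOnP (fun x => x == '0')
          (xs.map (fun v => if v != 0 then '1' else '0')) with _ | ⟨h, t⟩
      · exact absurd hparts (List.splitOnP_ne_nil _ _)
      · have hih := ih (c + 1)
        rw [hparts] at hih
        simp only [rsGo, if_neg hx, hih, List.modifyHead]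
        simp [mergeHead]
        omega

-- ===== VERDICT (by name: the statement is the Claim_ definition above) =====
theorem is_valid_list_spec : Claim_equal_is_valid_list := by
  intro n blocks innerlst _
  unfold Spec_is_valid_list is_valid_list is_valid_list_alt
  rw [guard2_eq]
  have hruns :
      (if (innerlst.foldl pvStepA ([], 0)).2 != 0
       then (innerlst.foldl pvStepA ([], 0)).1 ++ [(innerlst.foldl pvStepA ([], 0)).2]
       else (innerlst.foldl pvStepA ([], 0)).1)
      = pvRunsB (innerlst.map (fun v => if v != 0 then '1' else '0')) := by
    have hfold := foldA_eq_rsGo innerlst [] 0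
    simp only [Nat.cast_zero, List.nil_append] at hfold
    rw [hfold, rsGo_eq_mergeHead innerlst 0, mergeHead_zero, ← splitOn_def, pvRunsB]
  rw [hruns]
  split_ifs <;> simp_all
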